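-- pv_equiv track=rewrite | github.com/kennyg/try-py | src/try_py/fuzzy.py | highlight_matches
-- ===== SOURCE A (Python) =====
-- def highlight_matches(text: str, query: str) -> str:
--     """Wrap matched characters with highlight tokens."""
--     if not query:
--         return text
--
--     result = ""
--     text_lower = text.lower()
--     query_lower = query.lower()
--     query_chars = list(query_lower)
--     query_index = 0
--
--     for i, char in enumerate(text):
--         if query_index < len(query_chars) and text_lower[i] == query_chars[query_index]:
--             result += f"{{b}}{char}{{/b}}"
--             query_index += 1
--         else:
--             result += char
--
--     return result
-- ===== SOURCE B (Python) =====
-- def highlight_matches(text: str, query: str) -> str: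
--     """Wrap matched characters with highlight tokens."""
--     if not query:
--         return text
--
--     query_lower = query.lower()
--     # First pass: greedy scan of the lowered text collecting the indices to highlight.
--     positions = set()
--     query_index = 0
--     for i, ch in enumerate(text.lower()):
--         if query_index < len(query_lower) and ch == query_lower[query_index]:
--             positions.add(i)
--             query_index += 1
--     # Second pass: render the original text, wrapping the collected indices.
--     return "".join(
--         "{b}" + char + "{/b}" if i in positions else char
--         for i, char in enumerate(text)
--     )
-- ===== Notes on version B (the rewrite author's own statement) =====
-- stated objective: alternative
-- what changed: B first runs the greedy two-pointer scan over the lowered text to collect the set of matched indices, then renders the output in a second pass with ''.join over enumerate(text), instead of A's single loop that matches and appends to a result string at the same time.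
import Mathlib
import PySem

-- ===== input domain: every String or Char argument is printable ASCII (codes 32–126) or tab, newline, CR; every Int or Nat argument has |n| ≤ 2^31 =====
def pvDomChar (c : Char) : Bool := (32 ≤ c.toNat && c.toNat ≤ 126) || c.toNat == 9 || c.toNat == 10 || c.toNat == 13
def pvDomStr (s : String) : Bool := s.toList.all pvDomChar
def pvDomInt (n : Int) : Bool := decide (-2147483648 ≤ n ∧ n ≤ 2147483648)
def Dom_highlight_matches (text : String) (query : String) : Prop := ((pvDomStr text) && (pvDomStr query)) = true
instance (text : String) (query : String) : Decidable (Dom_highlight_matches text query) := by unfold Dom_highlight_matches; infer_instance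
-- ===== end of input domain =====

-- B collects the greedily matched text indices as a set in a first pass, then renders the
-- output in a second pass (alternative decomposition; A appends to the string while matching).


-- ===== PORT A =====
-- A's single loop: for i,char in enumerate(text), append "{b}char{/b}" or char to result.
def hlLoopA (tl qc : List Char) : List (Int × Char) → List Char → Nat → List Char
  | [], res, _ => res
  | (i, c) :: rest, res, qi =>
    if qi < qc.length ∧ PySem.List.pyGetD tl i ' ' = qc.getD qi ' ' then
      hlLoopA tl qc rest (res ++ ['{', 'b', '}', c, '{', '/', 'b', '}']) (qi + 1)
    else
      hlLoopA tl qc rest (res ++ [c]) qi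

def highlight_matches (text : String) (query : String) : String :=
  if query = "" then text
  else
    let tl := PySem.Chars.lower text.toList
    let qc := PySem.Chars.lower query.toList
    String.ofList (hlLoopA tl qc (PySem.List.enumerate text.toList 0) [] 0)

-- ===== PORT B =====
-- B pass 1: greedy scan over the lowered text collecting the matched indices into a set.
def hlPosB (qc : List Char) : List (Int × Char) → PySem.Set Int → Nat → PySem.Set Int
  | [], ps, _ => ps
  | (i, c) :: rest, ps, qi =>
    if qi < qc.length ∧ c = qc.getD qi ' ' then
      hlPosB qc rest (PySem.Set.add ps i) (qi + 1)
    else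
      hlPosB qc rest ps qi

-- B pass 2: ''.join over enumerate(text).
def hlRenderB (ps : PySem.Set Int) (pairs : List (Int × Char)) : List Char :=
  (pairs.map (fun p =>
    if PySem.Set.contains ps p.1 then ['{', 'b', '}', p.2, '{', '/', 'b', '}'] else [p.2])).flatten

def highlight_matches_alt (text : String) (query : String) : String :=
  if query = "" then text
  else
    let qc := PySem.Chars.lower query.toList
    let ps := hlPosB qc (PySem.List.enumerate (PySem.Chars.lower text.toList) 0) [] 0
    String.ofList (hlRenderB ps (PySem.List.enumerate text.toList 0))

-- ===== PRECONDITION & SPEC =====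
def Spec_highlight_matches (text : String) (query : String) (out : String) : Prop := out = highlight_matches_alt text query
instance (text : String) (query : String) (out : String) : Decidable (Spec_highlight_matches text query out) := by unfold Spec_highlight_matches; infer_instance

-- ===== CLAIM (what is proved, stated in full; the proofs are below) =====
def Claim_equal_highlight_matches : Prop := ∀ (text : String) (query : String), Dom_highlight_matches text query → Spec_highlight_matches text query (highlight_matches text query)

-- ===== LEMMAS AND PROOFS =====

-- hlPosB only ever adds elements: the accumulator set is preserved.
lemma mem_hlPosB_of_mem (qc : List Char) (pairs : List (Int × Char)) (ps : PySem.Set Int)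
    (qi : Nat) (x : Int) (hx : x ∈ ps) : x ∈ hlPosB qc pairs ps qi := by
  induction pairs generalizing ps qi with
  | nil => simpa [hlPosB] using hx
  | cons p rest ih =>
    obtain ⟨i, c⟩ := p
    simp only [hlPosB]
    split_ifs with h
    · exact ih _ _ ((PySem.Set.mem_add ps i x).2 (Or.inl hx))
    · exact ih _ _ hx

-- every element of hlPosB's result is in the accumulator or is an index of a pair.
lemma mem_hlPosB_cases (qc : List Char) (pairs : List (Int × Char)) (ps : PySem.Set Int)
    (qi : Nat) (x : Int) (hx : x ∈ hlPosB qc pairs ps qi) :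
    x ∈ ps ∨ ∃ p ∈ pairs, x = p.1 := by
  induction pairs generalizing ps qi with
  | nil => exact Or.inl (by simpa [hlPosB] using hx)
  | cons p rest ih =>
    obtain ⟨i, c⟩ := p
    simp only [hlPosB] at hx
    split_ifs at hx with h
    · rcases ih _ _ hx with h' | ⟨p', hp', he⟩
      · rcases (PySem.Set.mem_add ps i x).1 h' with h'' | h''
        · exact Or.inl h''
        · exact Or.inr ⟨(i, c), List.mem_cons_self, h''⟩
      · exact Or.inr ⟨p', List.mem_cons_of_mem _ hp', he⟩
    · rcases ih _ _ hx with h' | ⟨p', hp', he⟩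
      · exact Or.inl h'
      · exact Or.inr ⟨p', List.mem_cons_of_mem _ hp', he⟩

-- main invariant: A's loop over a suffix equals acc ++ B's render of that suffix with the
-- final set, provided the accumulator set only holds indices below the current position.
lemma hl_main (tl qc : List Char) (cs : List Char) :
    ∀ (s : Int) (qi : Nat) (ps : PySem.Set Int) (res : List Char),
    (∀ k : Nat, k < cs.length → PySem.List.pyGetD tl (s + (k : Int)) ' ' =
        PySem.Chars.lowerChar (cs.getD k ' ')) →
    (∀ x ∈ ps, x < s) →
    hlLoopA tl qc (PySem.List.enumerate cs s) res qi =
      res ++ hlRenderB (hlPosB qc (PySem.List.enumerate (PySem.Chars.lower cs) s) ps qi)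
        (PySem.List.enumerate cs s) := by
  induction cs with
  | nil => intro s qi ps res _ _; simp [hlLoopA, hlPosB, hlRenderB, PySem.Chars.lower, PySem.List.enumerate]
  | cons c cs ih =>
    intro s qi ps res H Hps
    have h0 : PySem.List.pyGetD tl s ' ' = PySem.Chars.lowerChar c := by
      have := H 0 (by simp)
      simpa using this
    have Hrest : ∀ k : Nat, k < cs.length →
        PySem.List.pyGetD tl (s + 1 + (k : Int)) ' ' = PySem.Chars.lowerChar (cs.getD k ' ') := by
      intro k hk
      have := H (k + 1) (by simpa using Nat.succ_lt_succ hk)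
      simpa [List.getD_cons_succ, add_assoc, add_comm, add_left_comm] using this
    have hLower : PySem.Chars.lower (c :: cs) = PySem.Chars.lowerChar c :: PySem.Chars.lower cs := by
      simp [PySem.Chars.lower]
    rw [PySem.List.enumerate_cons, hLower, PySem.List.enumerate_cons]
    by_cases hcond : qi < qc.length ∧ PySem.Chars.lowerChar c = qc.getD qi ' '
    · -- matched step
      have hA : (qi < qc.length ∧ PySem.List.pyGetD tl s ' ' = qc.getD qi ' ') := by
        exact ⟨hcond.1, by rw [h0]; exact hcond.2⟩
      simp only [hlLoopA, hlPosB, if_pos hcond, if_pos hA]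
      have hps' : ∀ x ∈ PySem.Set.add ps s, x < s + 1 := by
        intro x hx
        rcases (PySem.Set.mem_add ps s x).1 hx with h | h
        · exact lt_trans (Hps x h) (by omega)
        · omega
      rw [ih (s + 1) (qi + 1) (PySem.Set.add ps s) _ Hrest hps']
      -- the head index s is in the final set
      have hmem : s ∈ hlPosB qc (PySem.List.enumerate (PySem.Chars.lower cs) (s + 1))
          (PySem.Set.add ps s) (qi + 1) :=
        mem_hlPosB_of_mem _ _ _ _ _ ((PySem.Set.mem_add ps s s).2 (Or.inr rfl))
      have hcont : PySem.Set.contains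
          (hlPosB qc (PySem.List.enumerate (PySem.Chars.lower cs) (s + 1)) (PySem.Set.add ps s) (qi + 1)) s = true :=
        (PySem.Set.contains_iff _ _).2 hmem
      simp [hlRenderB, hmem]
    · -- non-matched step
      have hA : ¬ (qi < qc.length ∧ PySem.List.pyGetD tl s ' ' = qc.getD qi ' ') := by
        rw [h0]; exact hcond
      simp only [hlLoopA, hlPosB, if_neg hcond, if_neg hA]
      have hps' : ∀ x ∈ ps, x < s + 1 := fun x hx => lt_trans (Hps x hx) (by omega)
      rw [ih (s + 1) qi ps _ Hrest hps']
      -- the head index s is NOT in the final set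
      have hnmem : s ∉ hlPosB qc (PySem.List.enumerate (PySem.Chars.lower cs) (s + 1)) ps qi := by
        intro hmem
        rcases mem_hlPosB_cases _ _ _ _ _ hmem with h | ⟨p, hp, he⟩
        · exact absurd (Hps s h) (lt_irrefl s)
        · rcases (PySem.List.mem_enumerate_iff _ _ _).1 hp with ⟨k, hk, rfl⟩
          simp at he; omega
      have hcont : PySem.Set.contains
          (hlPosB qc (PySem.List.enumerate (PySem.Chars.lower cs) (s + 1)) ps qi) s = false := by
        by_contra h
        exact hnmem ((PySem.Set.contains_iff _ _).1 (by simpa using h))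
      simp [hlRenderB, hnmem]

-- ===== VERDICT (by name: the statement is the Claim_ definition above) =====
theorem highlight_matches_spec : Claim_equal_highlight_matches := by
  intro text query _
  unfold Spec_highlight_matches highlight_matches highlight_matches_alt
  by_cases hq : query = ""
  · simp [hq]
  · simp only [if_neg hq]
    congr 1
    have := hl_main (PySem.Chars.lower text.toList) (PySem.Chars.lower query.toList)
      text.toList 0 0 [] []
      (by
        intro k hk
        have hk' : k < (PySem.Chars.lower text.toList).length := by
          simpa [PySem.Chars.lower] using hk
        rw [show ((0 : Int) + (k : Int)) = ((k : Nat) : Int) by omega]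
        rw [PySem.List.pyGetD_natCast]
        rw [List.getD_eq_getElem _ _ hk]
        simp [PySem.Chars.lower, List.getElem?_eq_getElem hk])
      (by intro x hx; simp at hx)
    simpa using this
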